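-- pv_equiv track=rewrite | github.com/bryantmh/video-standardizer | video_standardizer.py | determine_best_extension
-- ===== SOURCE A (Python) =====
-- SUBTITLE_CODECS_BY_CONTAINER = {
--     'mkv': {
--         'subrip', 'srt', 'ass', 'ssa', 'webvtt', 'vtt',
--         'hdmv_pgs_subtitle', 'dvd_subtitle', 'dvb_subtitle',
--         'hdmv_text_subtitle', 'microdvd', 'xsub', 'ttml', 'dfxp',
--     },
--     'mp4': {
--         'mov_text', 'hdmv_text_subtitle', 'ttml', 'dfxp',
--     },
-- }
--
-- def get_supported_subtitle_codecs(container):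
--     return SUBTITLE_CODECS_BY_CONTAINER.get(container, set())
--
-- SUPPORTED_CONTAINERS = ('mkv', 'mp4')
--
-- def determine_best_extension(preferred_extension, selected_subtitle_codecs,
--                               input_ext=None, prefer_only=False):
--     # "Prefer only" mode: if the input is already one of the supported
--     # containers, keep it instead of remuxing to the preferred one — but
--     # only when the input container can actually hold the selected subs.
--     if (prefer_only and input_ext and input_ext.lower() in SUPPORTED_CONTAINERS):
--         input_ext_lc = input_ext.lower()
--         if not selected_subtitle_codecs:
--             return input_ext_lc
--         input_supported = get_supported_subtitle_codecs(input_ext_lc)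
--         if all(c in input_supported for c in selected_subtitle_codecs):
--             return input_ext_lc
--
--     if not selected_subtitle_codecs:
--         return preferred_extension
--
--     preferred_supported = get_supported_subtitle_codecs(preferred_extension)
--     if all(c in preferred_supported for c in selected_subtitle_codecs):
--         return preferred_extension
--
--     fallback = 'mp4' if preferred_extension == 'mkv' else 'mkv'
--     fallback_supported = get_supported_subtitle_codecs(fallback)
--     if all(c in fallback_supported for c in selected_subtitle_codecs):
--         return fallback
--
--     return 'mkv'
-- ===== SOURCE B (Python) =====
-- MKV_CODECS = frozenset({
--     'subrip', 'srt', 'ass', 'ssa', 'webvtt', 'vtt',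
--     'hdmv_pgs_subtitle', 'dvd_subtitle', 'dvb_subtitle',
--     'hdmv_text_subtitle', 'microdvd', 'xsub', 'ttml', 'dfxp',
-- })
-- MP4_CODECS = frozenset({'mov_text', 'hdmv_text_subtitle', 'ttml', 'dfxp'})
--
--
-- def determine_best_extension(preferred_extension, selected_subtitle_codecs,
--                              input_ext=None, prefer_only=False):
--     # Closed-form: one pass over the codecs computes two feasibility flags
--     # (can mkv hold them all? can mp4?); the answer is then a direct boolean
--     # formula over those flags -- no candidate list, no per-candidate scans.
--     mkv_ok = True
--     mp4_ok = True
--     for c in selected_subtitle_codecs: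
--         mkv_ok = mkv_ok and c in MKV_CODECS
--         mp4_ok = mp4_ok and c in MP4_CODECS
--
--     ilc = input_ext.lower() if input_ext else ''
--     if prefer_only and ilc == 'mkv' and mkv_ok:
--         return 'mkv'
--     if prefer_only and ilc == 'mp4' and mp4_ok:
--         return 'mp4'
--     if not selected_subtitle_codecs:
--         return preferred_extension
--     if mp4_ok and (preferred_extension == 'mp4'
--                    or (preferred_extension == 'mkv' and not mkv_ok)):
--         return 'mp4'
--     return 'mkv'
-- ===== Notes on version B (the rewrite author's own statement) =====
-- stated objective: simpler
-- what changed: Instead of trying an ordered list of candidate containers against per-container codec sets (up to three separate all(...) scans), B makes one pass over the codecs computing two feasibility flags (can mkv hold them all, can mp4), and then picks the answer by a direct boolean formula over those flags and the preferred/input extensions - no candidate scan at all.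
import Mathlib
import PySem

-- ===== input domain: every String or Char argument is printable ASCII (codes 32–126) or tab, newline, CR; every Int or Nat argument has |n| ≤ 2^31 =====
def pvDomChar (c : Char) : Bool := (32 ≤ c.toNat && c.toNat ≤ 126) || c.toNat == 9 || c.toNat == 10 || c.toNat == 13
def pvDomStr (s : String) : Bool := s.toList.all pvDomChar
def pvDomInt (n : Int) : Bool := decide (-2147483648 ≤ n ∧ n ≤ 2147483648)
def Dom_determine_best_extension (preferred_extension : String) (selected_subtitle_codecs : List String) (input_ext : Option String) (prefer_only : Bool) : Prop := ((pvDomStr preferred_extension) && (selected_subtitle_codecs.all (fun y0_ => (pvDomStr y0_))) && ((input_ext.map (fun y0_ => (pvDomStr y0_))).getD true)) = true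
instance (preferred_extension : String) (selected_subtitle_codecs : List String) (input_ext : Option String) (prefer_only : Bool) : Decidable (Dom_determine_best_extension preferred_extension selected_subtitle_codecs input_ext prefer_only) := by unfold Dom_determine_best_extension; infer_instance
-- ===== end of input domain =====

-- ===== PORT A =====
-- B replaces A's four unrolled candidate-checking branches with one pass computing two
-- feasibility flags and a direct boolean formula over them (objective: simpler).
-- SUBTITLE_CODECS_BY_CONTAINER / get_supported_subtitle_codecs: set of string literals
-- ported as a PySem.Set (distinct-element list) of those literals.
def pvSupportedA (container : String) : PySem.Set String :=
  if container = "mkv" then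
    PySem.Set.ofList ["subrip", "srt", "ass", "ssa", "webvtt", "vtt",
      "hdmv_pgs_subtitle", "dvd_subtitle", "dvb_subtitle",
      "hdmv_text_subtitle", "microdvd", "xsub", "ttml", "dfxp"]
  else if container = "mp4" then
    PySem.Set.ofList ["mov_text", "hdmv_text_subtitle", "ttml", "dfxp"]
  else PySem.Set.ofList []

def determine_best_extension (preferred_extension : String) (selected_subtitle_codecs : List String) (input_ext : Option String) (prefer_only : Bool) : String :=
  -- the early-returning prefer_only block, as an Option-valued step
  let block1 : Option String :=
    match input_ext with
    | none => none
    | some ie =>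
      if prefer_only && !(ie == "") && ["mkv", "mp4"].contains (PySem.Str.lower ie) then
        let input_ext_lc := PySem.Str.lower ie
        if selected_subtitle_codecs == [] then some input_ext_lc
        else
          let input_supported := pvSupportedA input_ext_lc
          if selected_subtitle_codecs.all (fun c => input_supported.contains c) then
            some input_ext_lc
          else none
      else none
  match block1 with
  | some r => r
  | none =>
    if selected_subtitle_codecs == [] then preferred_extension
    else
      let preferred_supported := pvSupportedA preferred_extension
      if selected_subtitle_codecs.all (fun c => preferred_supported.contains c) then
        preferred_extension
      else
        let fallback := if preferred_extension = "mkv" then "mp4" else "mkv"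
        let fallback_supported := pvSupportedA fallback
        if selected_subtitle_codecs.all (fun c => fallback_supported.contains c) then
          fallback
        else "mkv"

-- ===== PORT B =====
def pvMkvCodecs : PySem.Set String :=
  PySem.Set.ofList ["subrip", "srt", "ass", "ssa", "webvtt", "vtt",
    "hdmv_pgs_subtitle", "dvd_subtitle", "dvb_subtitle",
    "hdmv_text_subtitle", "microdvd", "xsub", "ttml", "dfxp"]
def pvMp4Codecs : PySem.Set String :=
  PySem.Set.ofList ["mov_text", "hdmv_text_subtitle", "ttml", "dfxp"]

def determine_best_extension_alt (preferred_extension : String) (selected_subtitle_codecs : List String) (input_ext : Option String) (prefer_only : Bool) : String :=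
  -- the single flag-computing pass of Source B
  let flags := selected_subtitle_codecs.foldl
    (fun (p : Bool × Bool) c => (p.1 && pvMkvCodecs.contains c, p.2 && pvMp4Codecs.contains c))
    (true, true)
  let mkv_ok := flags.1
  let mp4_ok := flags.2
  let ilc : String := match input_ext with
    | some ie => if !(ie == "") then PySem.Str.lower ie else ""
    | none => ""
  if prefer_only && ilc == "mkv" && mkv_ok then "mkv"
  else if prefer_only && ilc == "mp4" && mp4_ok then "mp4"
  else if selected_subtitle_codecs == [] then preferred_extension
  else if mp4_ok && (preferred_extension == "mp4"
        || (preferred_extension == "mkv" && !mkv_ok)) then "mp4"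
  else "mkv"

-- ===== PRECONDITION & SPEC =====
def Spec_determine_best_extension (preferred_extension : String) (selected_subtitle_codecs : List String) (input_ext : Option String) (prefer_only : Bool) (out : String) : Prop := out = determine_best_extension_alt preferred_extension selected_subtitle_codecs input_ext prefer_only
instance (preferred_extension : String) (selected_subtitle_codecs : List String) (input_ext : Option String) (prefer_only : Bool) (out : String) : Decidable (Spec_determine_best_extension preferred_extension selected_subtitle_codecs input_ext prefer_only out) := by unfold Spec_determine_best_extension; infer_instance

-- ===== CLAIM =====
def Claim_equal_determine_best_extension : Prop := ∀ (preferred_extension : String) (selected_subtitle_codecs : List String) (input_ext : Option String) (prefer_only : Bool), Dom_determine_best_extension preferred_extension selected_subtitle_codecs input_ext prefer_only → Spec_determine_best_extension preferred_extension selected_subtitle_codecs input_ext prefer_only (determine_best_extension preferred_extension selected_subtitle_codecs input_ext prefer_only)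

-- ===== LEMMAS AND PROOFS =====
theorem pv_flags_eq (sc : List String) (a b : Bool) :
    sc.foldl (fun (p : Bool × Bool) c => (p.1 && pvMkvCodecs.contains c, p.2 && pvMp4Codecs.contains c)) (a, b)
    = (a && sc.all (fun c => pvMkvCodecs.contains c), b && sc.all (fun c => pvMp4Codecs.contains c)) := by
  induction sc generalizing a b with
  | nil => simp
  | cons c cs ih => rw [List.foldl_cons, ih]; simp [Bool.and_assoc]

theorem pv_empty_all (sc : List String) (h : (sc == []) = false) :
    sc.all (fun c => (PySem.Set.ofList ([] : List String)).contains c) = false := by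
  cases sc with
  | nil => simp at h
  | cons c cs => simp [PySem.Set.ofList, PySem.Set.contains, List.all_cons]

-- A's three-branch tail equals B's flag formula (for nonempty codec lists)
theorem pv_tail (pe : String) (sc : List String) :
    (if sc.all (fun c => (pvSupportedA pe).contains c) then pe
     else if sc.all (fun c => (pvSupportedA (if pe = "mkv" then "mp4" else "mkv")).contains c)
       then (if pe = "mkv" then "mp4" else "mkv") else "mkv")
    = (if sc.all (fun c => pvMp4Codecs.contains c)
          && ((pe == "mp4") || ((pe == "mkv") && !sc.all (fun c => pvMkvCodecs.contains c)))
        then "mp4" else "mkv") ∨ sc = [] := by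
  by_cases h : sc = []
  · exact Or.inr h
  · left
    by_cases h1 : pe = "mkv"
    · subst h1
      have e1 : pvSupportedA "mkv" = pvMkvCodecs := rfl
      have e2 : pvSupportedA "mp4" = pvMp4Codecs := rfl
      simp only [reduceIte, e1, e2]
      cases ha : sc.all (fun c => pvMkvCodecs.contains c) <;>
        cases hb : sc.all (fun c => pvMp4Codecs.contains c) <;> simp [ha, hb]
    · by_cases h2 : pe = "mp4"
      · subst h2
        have e1 : pvSupportedA "mkv" = pvMkvCodecs := rfl
        have e2 : pvSupportedA "mp4" = pvMp4Codecs := rfl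
        simp only [e1, e2, show ("mp4" = "mkv") = False by simp, if_false]
        cases ha : sc.all (fun c => pvMkvCodecs.contains c) <;>
          cases hb : sc.all (fun c => pvMp4Codecs.contains c) <;> simp [ha, hb]
      · have h' : (sc == []) = false := by simp [h]
        have e0 : pvSupportedA pe = PySem.Set.ofList [] := by
          simp [pvSupportedA, h1, h2]
        have e1 : pvSupportedA "mkv" = pvMkvCodecs := rfl
        have hall := pv_empty_all sc h'
        have hb1 : (pe == "mp4") = false := by simp [h2]
        have hb2 : (pe == "mkv") = false := by simp [h1]
        simp only [h1, if_false, e0, e1, hall, hb1, hb2, Bool.false_eq_true,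
          Bool.false_and, Bool.or_self, Bool.and_false]
        cases ha : sc.all (fun c => pvMkvCodecs.contains c) <;> simp [ha]

-- ===== VERDICT =====
theorem determine_best_extension_spec : Claim_equal_determine_best_extension := by
  intro pe sc ie po _
  show determine_best_extension pe sc ie po = determine_best_extension_alt pe sc ie po
  unfold determine_best_extension determine_best_extension_alt
  simp only [pv_flags_eq, Bool.true_and]
  have htail := pv_tail pe sc
  cases ie with
  | none =>
    simp only [show (("" : String) == "mkv") = false from rfl,
      show (("" : String) == "mp4") = false from rfl,
      Bool.and_false, Bool.false_and, Bool.false_eq_true, if_false]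
    by_cases he : sc = []
    · simp [he]
    · have h' : (sc == []) = false := by simp [he]
      simp only [h', Bool.false_eq_true, if_false]
      exact htail.resolve_right he
  | some s =>
    by_cases hc : (po && !(s == "") && ["mkv", "mp4"].contains (PySem.Str.lower s)) = true
    · have hc2 : po = true ∧ ¬(s = "") ∧ (PySem.Str.lower s = "mkv" ∨ PySem.Str.lower s = "mp4") := by
        simpa [and_assoc] using hc
      obtain ⟨hpo, hne, hmem⟩ := hc2
      have hne' : (s == "") = false := by simp [hne]
      simp only [hc, if_true, hpo, hne', Bool.not_false, Bool.true_and, if_true]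
      rcases hmem with hl | hl <;> rw [hl]
      · have e1 : pvSupportedA "mkv" = pvMkvCodecs := rfl
        by_cases he : sc = []
        · simp [he]
        · have h' : (sc == []) = false := by simp [he]
          simp only [h', Bool.false_eq_true, if_false, e1,
            show (("mkv" : String) == "mkv") = true from rfl,
            show (("mkv" : String) == "mp4") = false from rfl,
            Bool.and_true, Bool.and_false, Bool.false_eq_true]
          cases ha : sc.all (fun c => pvMkvCodecs.contains c)
          · have ht := htail.resolve_right he
            rw [ha] at ht
            simpa [show ((["mkv", "mp4"] : List String).contains "mkv") = true from rfl] using ht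
          · simp
      · have e2 : pvSupportedA "mp4" = pvMp4Codecs := rfl
        by_cases he : sc = []
        · simp [he]
        · have h' : (sc == []) = false := by simp [he]
          simp only [h', Bool.false_eq_true, if_false, e2,
            show (("mp4" : String) == "mkv") = false from rfl,
            show (("mp4" : String) == "mp4") = true from rfl,
            Bool.and_true, Bool.and_false, Bool.false_eq_true]
          cases hb : sc.all (fun c => pvMp4Codecs.contains c)
          · have ht := htail.resolve_right he
            rw [hb] at ht
            simpa [show ((["mkv", "mp4"] : List String).contains "mp4") = true from rfl] using ht
          · simp
    · have hc' := eq_false_of_ne_true hc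
      simp only [hc', Bool.false_eq_true, if_false]
      have hguard : ∀ ext : String, ext ∈ (["mkv","mp4"] : List String) →
          (po && ((if !(s == "") then PySem.Str.lower s else "") == ext)) = false := by
        intro ext hextm
        by_cases hpo : po = true
        · by_cases hs : (s == "") = true
          · have : ((if !(s == "") then PySem.Str.lower s else "") == ext) = (("" : String) == ext) := by
              rw [hs]; rfl
            rw [this]
            have : ¬(("" : String) = ext) := by
              rintro rfl; simp at hextm
            simp [this]
          · have hs' : (s == "") = false := eq_false_of_ne_true hs
            by_cases hl : PySem.Str.lower s = ext
            · exfalso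
              rw [hpo, hs'] at hc'
              simp at hc' hextm
              rcases hextm with rfl | rfl
              · exact hc'.1 hl
              · exact hc'.2 hl
            · simp [hs', hl]
        · simp [eq_false_of_ne_true hpo]
      simp only [hguard "mkv" (by simp), hguard "mp4" (by simp),
        Bool.false_and, Bool.false_eq_true, if_false]
      by_cases he : sc = []
      · simp [he]
      · have h' : (sc == []) = false := by simp [he]
        simp only [h', Bool.false_eq_true, if_false]
        exact htail.resolve_right he
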